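-- pv_equiv track=rewrite | github.com/programmingdanielle/ridgeback | main.py | answer_test
-- ===== SOURCE A (Python) =====
-- def answer_test(q1, q2, q3):
--     questions = [q1, q2, q3]
--     firedrake = 0
--     waterdrake = 0
--     earthdrake = 0
--     for question in questions:
--         if question == "a":
--             firedrake += 1
--         if question == "b":
--             waterdrake += 1
--         if question == "c":
--             earthdrake += 1
--     if firedrake > waterdrake and firedrake > earthdrake:
--         return "You are a firedrake."
--     if waterdrake > firedrake and waterdrake > earthdrake:
--         return "You are a waterdrake."
--     if earthdrake > firedrake and earthdrake > waterdrake: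
--         return "You are an earthdrake."
--     else:
--         return "You're a tricky one, aren't you? Visit the Egg Shop at another time, and we'll see what we can do for you."
-- ===== SOURCE B (Python) =====
-- MSG = {
--     'a': "You are a firedrake.",
--     'b': "You are a waterdrake.",
--     'c': "You are an earthdrake.",
-- }
-- FALLBACK = ("You're a tricky one, aren't you? Visit the Egg Shop at another "
--             "time, and we'll see what we can do for you.")
--
--
-- def answer_test(q1, q2, q3):
--     # No counting: a drake wins iff its answer appears at least twice (then the
--     # other buckets hold at most one vote), or it is the sole valid answer.
--     if q1 == q2 and q1 in MSG:
--         return MSG[q1]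
--     if q1 == q3 and q1 in MSG:
--         return MSG[q1]
--     if q2 == q3 and q2 in MSG:
--         return MSG[q2]
--     valid = [q for q in (q1, q2, q3) if q in MSG]
--     if len(valid) == 1:
--         return MSG[valid[0]]
--     return FALLBACK
-- ===== Notes on version B (the rewrite author's own statement) =====
-- stated objective: alternative
-- what changed: Drops the tally entirely: B decides by direct equality tests (with only three votes a drake wins iff its valid answer appears at least twice, or it is the sole valid answer), instead of A's three counters compared pairwise.
import Mathlib
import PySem

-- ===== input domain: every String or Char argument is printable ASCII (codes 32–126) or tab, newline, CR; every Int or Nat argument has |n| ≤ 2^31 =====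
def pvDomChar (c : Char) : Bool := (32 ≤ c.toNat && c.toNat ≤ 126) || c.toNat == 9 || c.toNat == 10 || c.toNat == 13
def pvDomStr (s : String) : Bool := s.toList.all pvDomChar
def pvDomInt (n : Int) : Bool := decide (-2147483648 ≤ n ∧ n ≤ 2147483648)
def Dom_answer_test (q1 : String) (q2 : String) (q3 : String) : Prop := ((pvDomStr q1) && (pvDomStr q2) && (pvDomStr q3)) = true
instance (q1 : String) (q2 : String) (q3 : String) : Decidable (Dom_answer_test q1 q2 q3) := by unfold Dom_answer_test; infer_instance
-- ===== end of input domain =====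

-- B drops the tally: with only three votes a drake wins iff its valid answer appears
-- at least twice or is the sole valid answer, decided by direct equality tests
-- (objective: alternative decision procedure, same cost).


-- ===== PORT A =====
def answer_test (q1 : String) (q2 : String) (q3 : String) : String :=
  let questions := [q1, q2, q3]
  let s := questions.foldl (fun (s : Int × Int × Int) question =>
    let s := if question == "a" then (s.1 + 1, s.2.1, s.2.2) else s
    let s := if question == "b" then (s.1, s.2.1 + 1, s.2.2) else s
    if question == "c" then (s.1, s.2.1, s.2.2 + 1) else s) (0, 0, 0)
  let firedrake := s.1
  let waterdrake := s.2.1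
  let earthdrake := s.2.2
  if firedrake > waterdrake ∧ firedrake > earthdrake then "You are a firedrake."
  else if waterdrake > firedrake ∧ waterdrake > earthdrake then "You are a waterdrake."
  else if earthdrake > firedrake ∧ earthdrake > waterdrake then "You are an earthdrake."
  else "You're a tricky one, aren't you? Visit the Egg Shop at another time, and we'll see what we can do for you."

-- ===== PORT B =====
def pvMsg : PySem.Dict String String := PySem.Dict.mk
  [("a", "You are a firedrake."), ("b", "You are a waterdrake."), ("c", "You are an earthdrake.")]
def pvFallback : String := "You're a tricky one, aren't you? Visit the Egg Shop at another time, and we'll see what we can do for you."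

def answer_test_alt (q1 : String) (q2 : String) (q3 : String) : String :=
  if q1 == q2 && pvMsg.contains q1 then (pvMsg.get? q1).getD pvFallback   -- MSG[q1]; key present, getD arm unreachable
  else if q1 == q3 && pvMsg.contains q1 then (pvMsg.get? q1).getD pvFallback
  else if q2 == q3 && pvMsg.contains q2 then (pvMsg.get? q2).getD pvFallback
  else
    let valid := [q1, q2, q3].filter (fun q => pvMsg.contains q)
    if valid.length == 1 then (pvMsg.get? (valid.headD "")).getD pvFallback   -- MSG[valid[0]]; guarded, default unreachable
    else pvFallback

-- ===== PRECONDITION & SPEC =====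
def Spec_answer_test (q1 : String) (q2 : String) (q3 : String) (out : String) : Prop := out = answer_test_alt q1 q2 q3
instance (q1 : String) (q2 : String) (q3 : String) (out : String) : Decidable (Spec_answer_test q1 q2 q3 out) := by unfold Spec_answer_test; infer_instance

-- ===== CLAIM (what is proved, stated in full; the proofs are below) =====
def Claim_equal_answer_test : Prop := ∀ (q1 : String) (q2 : String) (q3 : String), Dom_answer_test q1 q2 q3 → Spec_answer_test q1 q2 q3 (answer_test q1 q2 q3)

-- ===== LEMMAS AND PROOFS =====

-- every string is "a", "b", "c", or none of the three
theorem pv_cls (q : String) :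
    q = "a" ∨ q = "b" ∨ q = "c" ∨
      (q ≠ "a" ∧ "a" ≠ q ∧ q ≠ "b" ∧ "b" ≠ q ∧ q ≠ "c" ∧ "c" ≠ q ∧
        (q == "a") = false ∧ (("a" : String) == q) = false ∧
        (q == "b") = false ∧ (("b" : String) == q) = false ∧
        (q == "c") = false ∧ (("c" : String) == q) = false) := by
  by_cases h1 : q = "a"
  · exact Or.inl h1
  by_cases h2 : q = "b"
  · exact Or.inr (Or.inl h2)
  by_cases h3 : q = "c"
  · exact Or.inr (Or.inr (Or.inl h3))
  · exact Or.inr (Or.inr (Or.inr ⟨h1, Ne.symm h1, h2, Ne.symm h2, h3, Ne.symm h3,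
      beq_false_of_ne h1, beq_false_of_ne (Ne.symm h1),
      beq_false_of_ne h2, beq_false_of_ne (Ne.symm h2),
      beq_false_of_ne h3, beq_false_of_ne (Ne.symm h3)⟩))

set_option maxHeartbeats 2000000 in
-- ===== VERDICT (by name: the statement is the Claim_ definition above) =====
theorem answer_test_spec : Claim_equal_answer_test := by
  intro q1 q2 q3 _
  unfold Spec_answer_test
  rcases pv_cls q1 with h1 | h1 | h1 | ⟨h1a, h1a', h1b, h1b', h1c, h1c', b1a, b1a', b1b, b1b', b1c, b1c'⟩ <;>
  rcases pv_cls q2 with h2 | h2 | h2 | ⟨h2a, h2a', h2b, h2b', h2c, h2c', b2a, b2a', b2b, b2b', b2c, b2c'⟩ <;>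
  rcases pv_cls q3 with h3 | h3 | h3 | ⟨h3a, h3a', h3b, h3b', h3c, h3c', b3a, b3a', b3b, b3b', b3c, b3c'⟩ <;>
    (simp_all [answer_test, answer_test_alt, pvMsg, pvFallback,
       PySem.Dict.contains, PySem.Dict.get?, List.filter, List.find?] <;>
     (repeat' split) <;> simp_all)
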